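-- pv_equiv track=rewrite | github.com/Simone94Richter/human-and-robotic-exploration | human-and-robotic-exploration/Python/ResultAnalyzer/ResultAnalyzer/ResultAnalyzer.py | compareOutcomes
-- ===== SOURCE A (Python) =====
-- def compareOutcomes(real, perceived, outcome):
--     comparison = [0, 0, 0]
--
--     for i in range(len(real)):
--         if (real[i] == outcome):
--             if (perceived[i] == "safe"):
--                 comparison[0] = comparison[0] + 1
--             elif (perceived[i] == "equal"):
--                 comparison[1] = comparison[1] + 1
--             else:
--                 comparison[2] = comparison[2] + 1
--
--     return comparison
-- ===== SOURCE B (Python) =====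
-- def compareOutcomes(real, perceived, outcome):
--     pairs = list(zip(real, perceived))
--
--     def go(chunk):
--         if len(chunk) == 0:
--             return (0, 0, 0)
--         if len(chunk) == 1:
--             r, p = chunk[0]
--             if r != outcome:
--                 return (0, 0, 0)
--             if p == "safe":
--                 return (1, 0, 0)
--             if p == "equal":
--                 return (0, 1, 0)
--             return (0, 0, 1)
--         m = len(chunk) // 2
--         s1, e1, o1 = go(chunk[:m])
--         s2, e2, o2 = go(chunk[m:])
--         return (s1 + s2, e1 + e2, o1 + o2)
--
--     s, e, o = go(pairs)
--     return [s, e, o]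
-- ===== Notes on version B (the rewrite author's own statement) =====
-- stated objective: alternative
-- what changed: Replaces A's sequential index loop mutating a three-cell counter with a divide-and-conquer recursion over the zipped (real, perceived) pairs: each half is tallied independently into a count triple and the triples are summed, correct because the three bucket counts are additive over list concatenation.
import Mathlib
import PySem

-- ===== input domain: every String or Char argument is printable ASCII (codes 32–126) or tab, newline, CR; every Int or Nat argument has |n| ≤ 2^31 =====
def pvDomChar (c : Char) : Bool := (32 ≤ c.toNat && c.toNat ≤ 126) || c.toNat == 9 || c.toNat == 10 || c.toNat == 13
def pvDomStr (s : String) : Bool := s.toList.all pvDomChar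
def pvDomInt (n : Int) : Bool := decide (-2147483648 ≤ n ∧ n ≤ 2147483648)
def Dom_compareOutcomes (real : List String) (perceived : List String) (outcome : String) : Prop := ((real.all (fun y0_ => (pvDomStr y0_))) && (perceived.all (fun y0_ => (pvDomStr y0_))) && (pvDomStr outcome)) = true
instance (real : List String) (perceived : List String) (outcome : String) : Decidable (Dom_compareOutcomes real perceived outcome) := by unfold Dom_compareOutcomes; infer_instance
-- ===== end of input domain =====

-- ===== PORT A =====
-- Header: B tallies the zipped (real, perceived) pairs by divide-and-conquer, summing the
-- per-half count triples, instead of A's index loop mutating a three-cell list (objective: alternative).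
def compareOutcomes (real : List String) (perceived : List String) (outcome : String) : List Int :=
  (PySem.List.pyRange 0 (PySem.List.len real) 1).foldl
    (fun comparison i =>
      if PySem.List.pyGetD real i "" == outcome then
        if PySem.List.pyGetD perceived i "" == "safe" then
          comparison.set 0 (PySem.List.pyGetD comparison 0 0 + 1)
        else if PySem.List.pyGetD perceived i "" == "equal" then
          comparison.set 1 (PySem.List.pyGetD comparison 1 0 + 1)
        else
          comparison.set 2 (PySem.List.pyGetD comparison 2 0 + 1)
      else comparison)
    [0, 0, 0]

-- ===== PORT B =====
-- classify one (real, perceived) pair into a count triple (Source B's single-element base case)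
def pvClassify (outcome : String) (rp : String × String) : Int × Int × Int :=
  if rp.1 != outcome then (0, 0, 0)
  else if rp.2 == "safe" then (1, 0, 0)
  else if rp.2 == "equal" then (0, 1, 0)
  else (0, 0, 1)

-- Source B's go: divide-and-conquer tally of a chunk of pairs
def pvGo (outcome : String) : List (String × String) → Int × Int × Int
  | [] => (0, 0, 0)
  | [rp] => pvClassify outcome rp
  | a :: b :: rest =>
      let l := a :: b :: rest
      let m := l.length / 2  -- Python len(chunk)//2 on a nonnegative length: Nat division is exact here
      let s1 := pvGo outcome (l.take m)
      let s2 := pvGo outcome (l.drop m)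
      (s1.1 + s2.1, s1.2.1 + s2.2.1, s1.2.2 + s2.2.2)
termination_by l => l.length
decreasing_by
  · simpa [List.length_take] using by omega
  · simpa [List.length_drop] using by omega

def compareOutcomes_alt (real : List String) (perceived : List String) (outcome : String) : List Int :=
  let pairs := real.zip perceived
  let t := pvGo outcome pairs
  [t.1, t.2.1, t.2.2]

-- ===== PRECONDITION & SPEC =====
-- Pre_ excludes exactly the inputs where Python A raises IndexError: an index i with
-- real[i] == outcome but i out of range for perceived.
def Pre_compareOutcomes (real : List String) (perceived : List String) (outcome : String) : Prop :=
  ∀ k ∈ List.range real.length, real.getD k "" = outcome → k < perceived.length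
instance (real : List String) (perceived : List String) (outcome : String) : Decidable (Pre_compareOutcomes real perceived outcome) := by unfold Pre_compareOutcomes; infer_instance
def pvWitness_compareOutcomes : List String × List String × String :=
  (["safe", "risk", "safe"], ["safe", "equal", "lava"], "safe")

def Spec_compareOutcomes (real : List String) (perceived : List String) (outcome : String) (out : List Int) : Prop := out = compareOutcomes_alt real perceived outcome
instance (real : List String) (perceived : List String) (outcome : String) (out : List Int) : Decidable (Spec_compareOutcomes real perceived outcome out) := by unfold Spec_compareOutcomes; infer_instance

-- ===== CLAIM (what is proved, stated in full; the proofs are below) =====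
def Claim_equal_compareOutcomes : Prop := ∀ (real : List String) (perceived : List String) (outcome : String), Dom_compareOutcomes real perceived outcome → Pre_compareOutcomes real perceived outcome → Spec_compareOutcomes real perceived outcome (compareOutcomes real perceived outcome)
-- ===== LEMMAS AND PROOFS =====

-- the perceived values at indices below n where real matches outcome
def pvMatched (real perceived : List String) (outcome : String) (n : Int) : List String :=
  ((PySem.List.pyRange 0 n 1).filter
      (fun i => PySem.List.pyGetD real i "" == outcome)).map
    (fun i => PySem.List.pyGetD perceived i "")

lemma pvSet0 (a b c : Int) :
    ([a, b, c].set 0 (PySem.List.pyGetD [a, b, c] 0 0 + 1) : List Int) = [a + 1, b, c] := rfl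
lemma pvSet1 (a b c : Int) :
    ([a, b, c].set 1 (PySem.List.pyGetD [a, b, c] 1 0 + 1) : List Int) = [a, b + 1, c] := rfl
lemma pvSet2 (a b c : Int) :
    ([a, b, c].set 2 (PySem.List.pyGetD [a, b, c] 2 0 + 1) : List Int) = [a, b, c + 1] := rfl

lemma pvMatched_succ (real perceived : List String) (outcome : String) (m : Nat) :
    pvMatched real perceived outcome ((m + 1 : Nat) : Int)
      = pvMatched real perceived outcome (m : Int)
        ++ (if PySem.List.pyGetD real (m : Int) "" == outcome
            then [PySem.List.pyGetD perceived (m : Int) ""] else []) := by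
  have hsplit : PySem.List.pyRange 0 ((m + 1 : Nat) : Int) 1
      = PySem.List.pyRange 0 (m : Int) 1 ++ [(m : Int)] := by
    push_cast
    exact PySem.List.pyRange_one_succ_right (by positivity)
  unfold pvMatched
  rw [hsplit, List.filter_append, List.map_append]
  simp only [List.filter_cons, List.filter_nil]
  split <;> simp

-- A's loop up to bound n equals the three counts over the matched list built up to n.
lemma compareOutcomes_inv (real perceived : List String) (outcome : String) (n : Nat) :
    (PySem.List.pyRange 0 (n : Int) 1).foldl
      (fun comparison i =>
        if PySem.List.pyGetD real i "" == outcome then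
          if PySem.List.pyGetD perceived i "" == "safe" then
            comparison.set 0 (PySem.List.pyGetD comparison 0 0 + 1)
          else if PySem.List.pyGetD perceived i "" == "equal" then
            comparison.set 1 (PySem.List.pyGetD comparison 1 0 + 1)
          else
            comparison.set 2 (PySem.List.pyGetD comparison 2 0 + 1)
        else comparison)
      [0, 0, 0]
    =
    [((pvMatched real perceived outcome n).count "safe" : Int),
      ((pvMatched real perceived outcome n).count "equal" : Int),
      ((pvMatched real perceived outcome n).countP
        (fun p => !(p == "safe") && !(p == "equal")) : Int)] := by
  induction n with
  | zero => simp [pvMatched]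
  | succ m ih =>
    have hsplit : PySem.List.pyRange 0 ((m + 1 : Nat) : Int) 1
        = PySem.List.pyRange 0 (m : Int) 1 ++ [(m : Int)] := by
      push_cast
      exact PySem.List.pyRange_one_succ_right (by positivity)
    rw [hsplit, List.foldl_append, ih, pvMatched_succ]
    simp only [List.foldl_cons, List.foldl_nil]
    by_cases h1 : PySem.List.pyGetD real (m : Int) "" == outcome
    · rw [if_pos h1]
      by_cases h2 : PySem.List.pyGetD perceived (m : Int) "" == "safe"
      · rw [if_pos h2, if_pos h1, eq_of_beq h2, pvSet0]
        simp [List.count_append, List.countP_append]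
      · rw [if_neg h2]
        by_cases h3 : PySem.List.pyGetD perceived (m : Int) "" == "equal"
        · rw [if_pos h3, if_pos h1, eq_of_beq h3, pvSet1]
          simp [List.count_append, List.countP_append]
        · rw [if_neg h3, if_pos h1, pvSet2]
          have hs : ¬ (perceived[m]?.getD "" = "safe") := by
            intro h; exact h2 (by simp [h])
          have he : ¬ (perceived[m]?.getD "" = "equal") := by
            intro h; exact h3 (by simp [h])
          simp [List.count_append, List.countP_append, hs, he]
    · rw [if_neg h1, if_neg h1]
      simp

-- Under Pre_, indices from min(len real, len perceived) to len real never match,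
-- so the matched list is already complete at the min length.
lemma pvMatched_stable (real perceived : List String) (outcome : String)
    (hpre : Pre_compareOutcomes real perceived outcome) :
    pvMatched real perceived outcome (real.length : Int)
      = pvMatched real perceived outcome ((min real.length perceived.length : Nat) : Int) := by
  set k := min real.length perceived.length with hk
  have hle : k ≤ real.length := Nat.min_le_left _ _
  have key : ∀ e : Nat, k + e ≤ real.length →
      pvMatched real perceived outcome ((k + e : Nat) : Int)
        = pvMatched real perceived outcome ((k : Nat) : Int) := by
    intro e
    induction e with
    | zero => intro _; rfl
    | succ f ihf =>
      intro hlef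
      have h1 : k + (f + 1) = (k + f) + 1 := by omega
      rw [h1, pvMatched_succ, ihf (by omega)]
      have hidx : k + f < real.length := by omega
      have hnomatch : ¬ (PySem.List.pyGetD real ((k + f : Nat) : Int) "" == outcome) := by
        intro h
        have hmatch : real.getD (k + f) "" = outcome := by
          have h' := eq_of_beq h
          rwa [PySem.List.pyGetD_natCast] at h'
        have hm2 := hpre (k + f) (List.mem_range.mpr hidx) hmatch
        rcases Nat.le_total real.length perceived.length with hc | hc
        · rw [Nat.min_eq_left hc] at hk; omega
        · rw [Nat.min_eq_right hc] at hk; omega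
      rw [if_neg hnomatch, List.append_nil]
  obtain ⟨d, hd⟩ := Nat.exists_eq_add_of_le hle
  rw [hd]
  exact key d (by omega)

-- counts over the matched prefix equal countP over the zipped pairs (n below both lengths)
lemma pvMatched_countP_zip (real perceived : List String) (outcome : String)
    (g : String → Bool) (n : Nat) (hn : n ≤ min real.length perceived.length) :
    ((pvMatched real perceived outcome (n : Int)).countP g : Int)
      = (((real.zip perceived).take n).countP (fun rp => rp.1 == outcome && g rp.2) : Int) := by
  induction n with
  | zero => simp [pvMatched]
  | succ m ih =>
    have hm : m ≤ min real.length perceived.length := by omega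
    have hr : m < real.length := by omega
    have hp : m < perceived.length := by omega
    have hz : m < (real.zip perceived).length := by simp [List.length_zip]; omega
    have htake : (real.zip perceived).take (m + 1)
        = (real.zip perceived).take m ++ [(real[m], perceived[m])] := by
      rw [List.take_add_one]
      congr 1
      rw [List.getElem?_eq_getElem hz]
      simp [List.getElem_zip]
    rw [pvMatched_succ, htake]
    push_cast [List.countP_append]
    rw [ih hm]
    have hget_r : PySem.List.pyGetD real ((m : Nat) : Int) "" = real[m] := by
      rw [PySem.List.pyGetD_natCast]; simp [List.getD, List.getElem?_eq_getElem hr]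
    have hget_p : PySem.List.pyGetD perceived ((m : Nat) : Int) "" = perceived[m] := by
      rw [PySem.List.pyGetD_natCast]; simp [List.getD, List.getElem?_eq_getElem hp]
    by_cases h1 : real[m] == outcome
    · by_cases h2 : g perceived[m] <;>
        simp [hget_r, hget_p, h1, h2]
    · simp [hget_r, h1]

-- Source B's divide-and-conquer tally computes the three bucket counts of its chunk
lemma pvGo_eq (outcome : String) (l : List (String × String)) :
    pvGo outcome l =
      ((l.countP (fun rp => rp.1 == outcome && rp.2 == "safe") : Int),
       (l.countP (fun rp => rp.1 == outcome && rp.2 == "equal") : Int),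
       (l.countP (fun rp => rp.1 == outcome && (!(rp.2 == "safe") && !(rp.2 == "equal"))) : Int)) := by
  generalize hn : l.length = n
  induction n using Nat.strong_induction_on generalizing l with
  | _ n ih =>
    match l with
    | [] => simp [pvGo]
    | [rp] =>
      simp only [pvGo, pvClassify, List.countP_cons, List.countP_nil]
      by_cases h1 : rp.1 = outcome
      · by_cases h2 : rp.2 = "safe"
        · simp [h1, h2]
        · by_cases h3 : rp.2 = "equal" <;> simp [h1, h2, h3]
      · simp [h1]
    | a :: b :: rest =>
      rw [pvGo]
      have hlen : rest.length + 2 = n := by simpa using hn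
      have ht : ((a :: b :: rest).take ((a :: b :: rest).length / 2)).length < n := by
        simp [List.length_take]; omega
      have hdl : ((a :: b :: rest).drop ((a :: b :: rest).length / 2)).length < n := by
        simp [List.length_drop]; omega
      rw [ih _ ht _ rfl, ih _ hdl _ rfl]
      have hsplit := List.take_append_drop ((a :: b :: rest).length / 2) (a :: b :: rest)
      simp only []
      refine Prod.ext ?_ (Prod.ext ?_ ?_) <;> simp only []
      · rw [← Int.natCast_add, ← List.countP_append, hsplit]
      · rw [← Int.natCast_add, ← List.countP_append, hsplit]
      · rw [← Int.natCast_add, ← List.countP_append, hsplit]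

-- ===== VERDICT (by name: the statement is the Claim_ definition above) =====
theorem compareOutcomes_spec : Claim_equal_compareOutcomes := by
  intro real perceived outcome _ hpre
  unfold Spec_compareOutcomes compareOutcomes compareOutcomes_alt
  have hk : (min real.length perceived.length) = (real.zip perceived).length := by
    simp [List.length_zip]
  rw [show PySem.List.len real = (real.length : Int) from rfl]
  rw [compareOutcomes_inv, pvMatched_stable real perceived outcome hpre]
  have htake : (real.zip perceived).take (min real.length perceived.length)
      = real.zip perceived := by rw [hk]; exact List.take_length
  simp only [pvGo_eq]
  have hS := pvMatched_countP_zip real perceived outcome (fun p => p == "safe")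
    (min real.length perceived.length) (le_refl _)
  have hE := pvMatched_countP_zip real perceived outcome (fun p => p == "equal")
    (min real.length perceived.length) (le_refl _)
  have hO := pvMatched_countP_zip real perceived outcome
    (fun p => !(p == "safe") && !(p == "equal")) (min real.length perceived.length) (le_refl _)
  rw [htake] at hS hE hO
  simp only [List.count_eq_countP, List.cons.injEq, and_true]
  exact ⟨by exact_mod_cast hS, by exact_mod_cast hE, by exact_mod_cast hO⟩
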